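-- pv_equiv track=rewrite | github.com/MarisiaS/MalletMathGame | generadorniveles.py | quitar
-- ===== SOURCE A (Python) =====
-- def quitar(datos,target):
--     if target == 0:
--         return datos
--     if target < 0:
--         return None
--     if len(datos) == 0:
--         return None
--     no_agregar = quitar(datos[:-1],target)
--     if no_agregar is None:
--         return quitar(datos[:-1],target-datos[-1])
--     else:
--         no_agregar.append(datos[-1])
--         return no_agregar
-- ===== SOURCE B (Python) =====
-- def quitar(datos, target):
--     memo = {}
--     def feasible(i, t):
--         # subset of datos[:i] sums to t, under A's rules (t==0 checked first, t<0 infeasible)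
--         if t == 0:
--             return True
--         if t < 0 or i == 0:
--             return False
--         key = (i, t)
--         if key not in memo:
--             memo[key] = feasible(i - 1, t) or feasible(i - 1, t - datos[i - 1])
--         return memo[key]
--     n = len(datos)
--     if not feasible(n, target):
--         return None
--     out = []
--     i, t = n, target
--     while i > 0 and t != 0:
--         if feasible(i - 1, t):
--             out.append(datos[i - 1])
--         else:
--             t -= datos[i - 1]
--         i -= 1
--     return datos[:i] + out[::-1]
-- ===== Notes on version B (the rewrite author's own statement) =====
-- stated objective: alternative
-- what changed: Replaces the exponential double recursion with a memoized (index,target) subset-sum feasibility table plus an iterative reconstruction that keeps the same prefer-to-keep-later-elements choice.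
import Mathlib
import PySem

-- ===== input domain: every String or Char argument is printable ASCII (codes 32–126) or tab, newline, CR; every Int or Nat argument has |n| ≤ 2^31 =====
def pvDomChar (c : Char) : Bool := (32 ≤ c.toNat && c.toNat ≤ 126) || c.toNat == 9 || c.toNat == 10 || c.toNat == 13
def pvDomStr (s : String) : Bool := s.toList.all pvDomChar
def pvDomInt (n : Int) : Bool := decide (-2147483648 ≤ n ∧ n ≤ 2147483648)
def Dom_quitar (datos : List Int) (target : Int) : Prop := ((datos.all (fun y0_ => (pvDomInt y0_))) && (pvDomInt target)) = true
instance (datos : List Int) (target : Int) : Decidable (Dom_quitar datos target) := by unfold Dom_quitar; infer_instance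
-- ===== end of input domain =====

-- B replaces A's exponential double recursion with a memoized (index,target) feasibility table plus an
-- iterative reconstruction with the same keep-preference (objective: alternative).
-- ===== PORT A =====
def quitar (datos : List Int) (target : Int) : Option (List Int) :=
  if target = 0 then some datos
  else if target < 0 then none
  else if _h : datos.length = 0 then none
  else
    -- datos[:-1] = dropLast, datos[-1] = getLastD (the list is nonempty in this branch)
    match quitar datos.dropLast target with
    | some no_agregar => some (no_agregar ++ [datos.getLastD 0])
    | none => quitar datos.dropLast (target - datos.getLastD 0)
termination_by datos.length
decreasing_by all_goals (simp [List.length_dropLast]; omega)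

-- ===== PORT B =====
-- feasible(i, t) of Source B (Source B's memo dict only caches values; the computed values are identical)
def feasB (datos : List Int) (i : Nat) (t : Int) : Bool :=
  if t = 0 then true
  else if t < 0 then false
  else match i with
    | 0 => false
    | j + 1 => feasB datos j t || feasB datos j (t - datos.getD j 0)

-- the while loop of Source B; `out` is the append-accumulator, cons-ed so the final out[::-1] is `out` itself
def reconB (datos : List Int) (i : Nat) (t : Int) (out : List Int) : List Int :=
  if t = 0 then datos.take i ++ out
  else match i with
    | 0 => datos.take 0 ++ out
    | j + 1 =>
      if feasB datos j t then reconB datos j t (datos.getD j 0 :: out)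
      else reconB datos j (t - datos.getD j 0) out

def quitar_alt (datos : List Int) (target : Int) : Option (List Int) :=
  if feasB datos datos.length target then some (reconB datos datos.length target [])
  else none

-- ===== PRECONDITION & SPEC =====
def Spec_quitar (datos : List Int) (target : Int) (out : Option (List Int)) : Prop := out = quitar_alt datos target
instance (datos : List Int) (target : Int) (out : Option (List Int)) : Decidable (Spec_quitar datos target out) := by unfold Spec_quitar; infer_instance

-- ===== CLAIM (what is proved, stated in full; the proofs are below) =====
def Claim_equal_quitar : Prop := ∀ (datos : List Int) (target : Int), Dom_quitar datos target → Spec_quitar datos target (quitar datos target)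

-- ===== LEMMAS AND PROOFS =====
theorem feasB_zero (d : List Int) (t : Int) :
    feasB d 0 t = if t = 0 then true else false := by
  rw [feasB.eq_def]
  split
  · rfl
  · split <;> rfl

theorem feasB_succ (d : List Int) (j : Nat) (t : Int) :
    feasB d (j + 1) t =
      if t = 0 then true
      else if t < 0 then false
      else feasB d j t || feasB d j (t - d.getD j 0) := by
  rw [feasB.eq_def]

theorem reconB_zero (d : List Int) (t : Int) (out : List Int) :
    reconB d 0 t out = d.take 0 ++ out := by
  rw [reconB.eq_def]
  split <;> rfl

theorem reconB_succ (d : List Int) (j : Nat) (t : Int) (out : List Int) :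
    reconB d (j + 1) t out =
      if t = 0 then d.take (j + 1) ++ out
      else if feasB d j t then reconB d j t (d.getD j 0 :: out)
      else reconB d j (t - d.getD j 0) out := by
  rw [reconB.eq_def]

theorem feasB_concat (xs : List Int) (x : Int) (i : Nat) (hi : i ≤ xs.length) (t : Int) :
    feasB (xs ++ [x]) i t = feasB xs i t := by
  induction i generalizing t with
  | zero => rw [feasB_zero, feasB_zero]
  | succ j ih =>
    have hj : j < xs.length := by omega
    rw [feasB_succ, feasB_succ, List.getD_append _ _ _ _ hj, ih (by omega), ih (by omega)]

theorem reconB_concat (xs : List Int) (x : Int) (i : Nat) (hi : i ≤ xs.length) (t : Int)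
    (out : List Int) : reconB (xs ++ [x]) i t out = reconB xs i t out := by
  induction i generalizing t out with
  | zero => rw [reconB_zero, reconB_zero]; simp
  | succ j ih =>
    have hj : j < xs.length := by omega
    rw [reconB_succ, reconB_succ, List.getD_append _ _ _ _ hj,
        feasB_concat xs x j (by omega), List.take_append_of_le_length (by omega)]
    split_ifs
    · rfl
    · exact ih (by omega) _ _
    · exact ih (by omega) _ _

theorem quitar_isSome (xs : List Int) (t : Int) :
    (quitar xs t).isSome = feasB xs xs.length t := by
  induction xs using List.reverseRecOn generalizing t with
  | nil =>
    rw [quitar, List.length_nil, feasB_zero]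
    by_cases h0 : t = 0
    · rw [if_pos h0, if_pos h0]; rfl
    · rw [if_neg h0, if_neg h0]
      by_cases hn : t < 0
      · rw [if_pos hn]; rfl
      · rw [if_neg hn, dif_pos rfl]; rfl
  | append_singleton ys y ih =>
    have hlen : (ys ++ [y]).length = ys.length + 1 := by simp
    rw [quitar, hlen, feasB_succ]
    by_cases h0 : t = 0
    · rw [if_pos h0, if_pos h0]; rfl
    · rw [if_neg h0, if_neg h0]
      by_cases hn : t < 0
      · rw [if_pos hn, if_pos hn]; rfl
      · rw [if_neg hn, if_neg hn, dif_neg (by omega : ¬(ys.length + 1 = 0))]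
        simp only [List.dropLast_concat, List.getLastD_concat]
        have hg : (ys ++ [y]).getD ys.length 0 = y := by
          rw [List.getD_append_right _ _ _ _ (le_refl ys.length)]; simp
        rw [hg, feasB_concat ys y ys.length (le_refl _), feasB_concat ys y ys.length (le_refl _)]
        cases h : quitar ys t with
        | some l =>
          have h1 := ih t
          rw [h] at h1
          simp [← h1]
        | none =>
          have h1 := ih t
          rw [h] at h1
          rw [ih (t - y), ← h1]
          simp

theorem quitar_recon (xs : List Int) (t : Int) (l : List Int) (h : quitar xs t = some l)
    (out : List Int) : reconB xs xs.length t out = l ++ out := by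
  induction xs using List.reverseRecOn generalizing t l out with
  | nil =>
    rw [quitar] at h
    by_cases h0 : t = 0
    · rw [if_pos h0] at h
      simp only [Option.some.injEq] at h
      rw [List.length_nil, reconB_zero, ← h]
      simp
    · rw [if_neg h0] at h
      by_cases hn : t < 0
      · rw [if_pos hn] at h; exact absurd h (by simp)
      · rw [if_neg hn] at h; simp at h
  | append_singleton ys y ih =>
    have hlen : (ys ++ [y]).length = ys.length + 1 := by simp
    rw [hlen, reconB_succ]
    rw [quitar] at h
    by_cases h0 : t = 0
    · rw [if_pos h0] at h
      simp only [Option.some.injEq] at h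
      rw [if_pos h0, List.take_of_length_le (by simp), h]
    · rw [if_neg h0] at h
      rw [if_neg h0]
      by_cases hn : t < 0
      · rw [if_pos hn] at h; exact absurd h (by simp)
      · rw [if_neg hn, dif_neg (by simp : ¬((ys ++ [y]).length = 0))] at h
        simp only [List.dropLast_concat, List.getLastD_concat] at h
        have hg : (ys ++ [y]).getD ys.length 0 = y := by
          rw [List.getD_append_right _ _ _ _ (le_refl ys.length)]; simp
        rw [hg]
        cases hq : quitar ys t with
        | some l' =>
          rw [hq] at h
          simp only [Option.some.injEq] at h
          have hf : feasB ys ys.length t = true := by rw [← quitar_isSome, hq]; rfl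
          rw [if_pos (by rw [feasB_concat ys y ys.length (le_refl _)]; exact hf),
              reconB_concat ys y ys.length (le_refl _), ih t l' hq, ← h]
          simp
        | none =>
          rw [hq] at h
          have hf : feasB ys ys.length t = false := by rw [← quitar_isSome, hq]; rfl
          rw [if_neg (by rw [feasB_concat ys y ys.length (le_refl _)]; simp [hf]),
              reconB_concat ys y ys.length (le_refl _)]
          exact ih (t - y) l h out

-- ===== VERDICT (by name: the statement is the Claim_ definition above) =====
theorem quitar_spec : Claim_equal_quitar := by
  intro datos target _
  unfold Spec_quitar quitar_alt
  cases h : quitar datos target with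
  | some l =>
    have hf : feasB datos datos.length target = true := by rw [← quitar_isSome, h]; rfl
    rw [if_pos hf, quitar_recon datos target l h []]
    simp
  | none =>
    have hf : feasB datos datos.length target = false := by rw [← quitar_isSome, h]; rfl
    rw [if_neg (by simp [hf])]
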